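-- pv_equiv track=rewrite | github.com/andrewili/shape-grammar-engine | package_package/package/translators/shape.py | _make_ordered_coord_list
-- ===== SOURCE A (Python) =====
-- def _make_ordered_coord_list(line_specs, lpoint_specs):
--     """Receives a list of line specs and a list of labeled point specs:
--         [((num, num, num), (num, num, num)), ...]
--         [((num, num, num), str), ...]
--     Returns an ordered list of unique fitted coords:
--         [(num, num, num), ...]
--     """
--     coords = []
--     unique_coords = []
--     for line_spec in line_specs:
--         for coord in line_spec:
--             coords.append(coord)
--     for lpoint_spec in lpoint_specs:
--         coord = lpoint_spec[0]
--         coords.append(coord)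
--     for coord in coords:
--         if not coord in unique_coords:
--             unique_coords.append(coord)
--     return sorted(unique_coords)
-- ===== SOURCE B (Python) =====
-- def _make_ordered_coord_list(line_specs, lpoint_specs):
--     coords = sorted(
--         [coord for line_spec in line_specs for coord in line_spec] +
--         [lpoint_spec[0] for lpoint_spec in lpoint_specs])
--     ordered_coords = []
--     for coord in coords:
--         if not ordered_coords or ordered_coords[-1] != coord:
--             ordered_coords.append(coord)
--     return ordered_coords
-- ===== Notes on version B (the rewrite author's own statement) =====
-- stated objective: faster
-- what changed: Replaces the quadratic 'not in unique_coords' membership dedup followed by a sort with one flat comprehension, a single sorted() up front, and a linear pass that keeps a coord only when it differs from the last kept one.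
import Mathlib
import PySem

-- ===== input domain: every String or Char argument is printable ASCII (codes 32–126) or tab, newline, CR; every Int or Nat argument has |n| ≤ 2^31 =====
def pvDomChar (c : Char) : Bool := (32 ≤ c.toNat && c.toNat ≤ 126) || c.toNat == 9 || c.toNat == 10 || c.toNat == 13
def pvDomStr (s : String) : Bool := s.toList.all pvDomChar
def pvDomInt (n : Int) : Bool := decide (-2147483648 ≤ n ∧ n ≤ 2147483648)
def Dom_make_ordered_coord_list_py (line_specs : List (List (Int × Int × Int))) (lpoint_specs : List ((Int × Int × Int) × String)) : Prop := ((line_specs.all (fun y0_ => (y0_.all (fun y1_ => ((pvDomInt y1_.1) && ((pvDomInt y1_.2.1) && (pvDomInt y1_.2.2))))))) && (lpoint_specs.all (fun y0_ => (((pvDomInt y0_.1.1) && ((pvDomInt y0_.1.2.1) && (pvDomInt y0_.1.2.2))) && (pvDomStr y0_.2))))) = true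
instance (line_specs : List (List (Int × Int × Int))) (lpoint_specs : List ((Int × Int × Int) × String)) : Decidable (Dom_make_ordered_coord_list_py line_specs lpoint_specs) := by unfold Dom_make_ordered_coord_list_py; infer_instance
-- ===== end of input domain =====

-- B replaces A's quadratic 'not in unique_coords' dedup-then-sort with sort-first then one
-- linear pass dropping adjacent duplicates (objective: faster, O(n^2) -> O(n log n)).


-- shared order encoding: Python's lexicographic order on (num, num, num) tuples
-- is the Prod.Lex order under this injective key (Mathlib's plain '<' on products is pointwise)
def pvLexKey (c : Int × Int × Int) : Int ×ₗ (Int ×ₗ Int) := toLex (c.1, toLex (c.2.1, c.2.2))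

-- ===== PORT A =====
def make_ordered_coord_list_py (line_specs : List (List (Int × Int × Int))) (lpoint_specs : List ((Int × Int × Int) × String)) : List (Int × Int × Int) :=
  let coords0 : List (Int × Int × Int) :=
    line_specs.foldl (fun acc line_spec => line_spec.foldl (fun acc2 coord => acc2 ++ [coord]) acc) []
  let coords : List (Int × Int × Int) :=
    lpoint_specs.foldl (fun acc lpoint_spec => acc ++ [lpoint_spec.1]) coords0
  let unique_coords : List (Int × Int × Int) :=
    coords.foldl (fun u coord => if coord ∈ u then u else u ++ [coord]) []
  PySem.List.sorted unique_coords pvLexKey false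

-- ===== PORT B =====
def make_ordered_coord_list_py_alt (line_specs : List (List (Int × Int × Int))) (lpoint_specs : List ((Int × Int × Int) × String)) : List (Int × Int × Int) :=
  let coords : List (Int × Int × Int) :=
    PySem.List.sorted (line_specs.flatMap (fun line_spec => line_spec) ++ lpoint_specs.map (fun lpoint_spec => lpoint_spec.1)) pvLexKey false
  coords.foldl (fun ordered coord =>
    match ordered.getLast? with
    | none => [coord]
    | some p => if p ≠ coord then ordered ++ [coord] else ordered) []

-- ===== PRECONDITION & SPEC =====
def Spec_make_ordered_coord_list_py (line_specs : List (List (Int × Int × Int))) (lpoint_specs : List ((Int × Int × Int) × String)) (out : List (Int × Int × Int)) : Prop := out = make_ordered_coord_list_py_alt line_specs lpoint_specs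
instance (line_specs : List (List (Int × Int × Int))) (lpoint_specs : List ((Int × Int × Int) × String)) (out : List (Int × Int × Int)) : Decidable (Spec_make_ordered_coord_list_py line_specs lpoint_specs out) := by unfold Spec_make_ordered_coord_list_py; infer_instance

-- ===== CLAIM (what is proved, stated in full; the proofs are below) =====
def Claim_equal_make_ordered_coord_list_py : Prop := ∀ (line_specs : List (List (Int × Int × Int))) (lpoint_specs : List ((Int × Int × Int) × String)), Dom_make_ordered_coord_list_py line_specs lpoint_specs → Spec_make_ordered_coord_list_py line_specs lpoint_specs (make_ordered_coord_list_py line_specs lpoint_specs)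

-- ===== LEMMAS AND PROOFS =====

-- functional characterisation of B's adjacent-duplicate-dropping loop
def pvCollapse (p : Option (Int × Int × Int)) : List (Int × Int × Int) → List (Int × Int × Int)
  | [] => []
  | c :: cs => if p = some c then pvCollapse p cs else c :: pvCollapse (some c) cs

lemma pvLexKey_inj : Function.Injective pvLexKey := by
  intro a b h
  simp only [pvLexKey] at h
  have h' := toLex.injective h
  have h1 : a.1 = b.1 := congrArg Prod.fst h'
  have h2 := toLex.injective (congrArg Prod.snd h')
  exact Prod.ext h1 (Prod.ext (congrArg Prod.fst h2) (congrArg Prod.snd h2))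

lemma pvCollapse_foldl : ∀ (s out : List (Int × Int × Int)),
    s.foldl (fun ordered coord =>
      match ordered.getLast? with
      | none => [coord]
      | some p => if p ≠ coord then ordered ++ [coord] else ordered) out
    = out ++ pvCollapse out.getLast? s := by
  intro s
  induction s with
  | nil => intro out; simp [pvCollapse]
  | cons c cs ih =>
    intro out
    cases h : out.getLast? with
    | none =>
      have hout : out = [] := List.getLast?_eq_none_iff.mp h
      subst hout
      simp only [List.foldl_cons, h, ih, pvCollapse]
      simp
    | some p =>
      simp only [List.foldl_cons, h]
      by_cases hpc : p = c
      · subst hpc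
        have hstep : (if p ≠ p then out ++ [p] else out) = out := if_neg (fun hh => hh rfl)
        rw [hstep, ih, h]
        simp [pvCollapse]
      · have : (if p ≠ c then out ++ [c] else out) = out ++ [c] := by simp [hpc]
        rw [this, ih]
        have hl : (out ++ [c]).getLast? = some c := by simp
        rw [hl]
        simp only [pvCollapse, Option.some.injEq]
        rw [if_neg hpc]
        simp

lemma pvCollapse_sublist : ∀ (p : Option (Int × Int × Int)) (s : List (Int × Int × Int)),
    (pvCollapse p s).Sublist s := by
  intro p s
  induction s generalizing p with
  | nil => simp [pvCollapse]
  | cons c cs ih =>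
    simp only [pvCollapse]
    split_ifs with h
    · exact (ih p).trans (List.sublist_cons_self c cs)
    · exact (ih (some c)).cons₂ c

lemma mem_pvCollapse_of_mem : ∀ (p : Option (Int × Int × Int)) (s : List (Int × Int × Int))
    (x : Int × Int × Int), x ∈ s → x ∈ pvCollapse p s ∨ p = some x := by
  intro p s
  induction s generalizing p with
  | nil => intro x hx; cases hx
  | cons c cs ih =>
    intro x hx
    simp only [pvCollapse]
    split_ifs with h
    · rcases List.mem_cons.mp hx with rfl | hx'
      · right; exact h
      · exact ih p x hx'
    · rcases List.mem_cons.mp hx with rfl | hx'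
      · left; exact List.mem_cons_self
      · rcases ih (some c) x hx' with hin | heq
        · left; exact List.mem_cons_of_mem _ hin
        · left; cases heq; exact List.mem_cons_self

lemma pvCollapse_pairwise : ∀ (p : Option (Int × Int × Int)) (s : List (Int × Int × Int)),
    s.Pairwise (fun a b => pvLexKey a ≤ pvLexKey b) →
    (∀ q, p = some q → ∀ c ∈ s, pvLexKey q ≤ pvLexKey c) →
    (pvCollapse p s).Pairwise (fun a b => pvLexKey a < pvLexKey b) ∧
    (∀ q, p = some q → ∀ c ∈ pvCollapse p s, pvLexKey q < pvLexKey c) := by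
  intro p s
  induction s generalizing p with
  | nil => intro _ _; exact ⟨List.Pairwise.nil, fun q _ c hc => absurd hc (by simp [pvCollapse])⟩
  | cons c cs ih =>
    intro hpw hbd
    have hpw' : cs.Pairwise (fun a b => pvLexKey a ≤ pvLexKey b) := (List.pairwise_cons.mp hpw).2
    have hhead : ∀ b ∈ cs, pvLexKey c ≤ pvLexKey b := (List.pairwise_cons.mp hpw).1
    simp only [pvCollapse]
    split_ifs with h
    · -- dropped: c equals the previous kept element
      have := ih p hpw' (fun q hq b hb => hbd q hq b (List.mem_cons_of_mem _ hb))
      exact this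
    · -- kept
      have hih := ih (some c) hpw' (fun q hq b hb => by cases hq; exact hhead b hb)
      constructor
      · refine List.pairwise_cons.mpr ⟨fun b hb => hih.2 c rfl b hb, hih.1⟩
      · intro q hq b hb
        cases hq
        have hqc : pvLexKey q ≤ pvLexKey c := hbd q rfl c List.mem_cons_self
        have hqc' : pvLexKey q ≠ pvLexKey c := fun he => h (by rw [pvLexKey_inj he])
        have hlt : pvLexKey q < pvLexKey c := lt_of_le_of_ne hqc hqc'
        rcases List.mem_cons.mp hb with rfl | hb'
        · exact hlt
        · exact hlt.trans (hih.2 c rfl b hb')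

lemma pvCollapse_eq_sorted_dedup (coords : List (Int × Int × Int)) :
    PySem.List.sorted (PySem.List.dedup coords) pvLexKey false
      = pvCollapse none (PySem.List.sorted coords pvLexKey false) := by
  set s := PySem.List.sorted coords pvLexKey false with hs
  have hpw : s.Pairwise (fun a b => pvLexKey a ≤ pvLexKey b) := PySem.List.sorted_pairwise coords pvLexKey
  have hmain := pvCollapse_pairwise none s hpw (fun q hq => by cases hq)
  have hlt : (pvCollapse none s).Pairwise (fun a b => pvLexKey a < pvLexKey b) := hmain.1
  have hnd : (pvCollapse none s).Nodup := by
    refine hlt.imp ?_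
    intro a b hab rfl
    exact absurd hab (lt_irrefl _)
  have hmem : ∀ x, x ∈ pvCollapse none s ↔ x ∈ PySem.List.dedup coords := by
    intro x
    rw [PySem.List.mem_dedup]
    constructor
    · intro hx
      have := (pvCollapse_sublist none s).mem hx
      rwa [hs, PySem.List.mem_sorted] at this
    · intro hx
      have hx' : x ∈ s := by rw [hs, PySem.List.mem_sorted]; exact hx
      rcases mem_pvCollapse_of_mem none s x hx' with hin | heq
      · exact hin
      · cases heq
  have hperm : (pvCollapse none s).Perm (PySem.List.dedup coords) :=
    (List.perm_ext_iff_of_nodup hnd (PySem.List.nodup_dedup coords)).mpr hmem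
  exact PySem.List.sorted_eq_of_perm_of_pairwise_lt _ _ _ hperm hlt

-- ===== VERDICT (by name: the statement is the Claim_ definition above) =====
theorem make_ordered_coord_list_py_spec : Claim_equal_make_ordered_coord_list_py := by
  intro line_specs lpoint_specs _
  unfold Spec_make_ordered_coord_list_py make_ordered_coord_list_py make_ordered_coord_list_py_alt
  simp only []
  -- A's coord-collecting loops build the same flat list as B's comprehensions
  have hinner : ∀ (acc : List (Int × Int × Int)),
      line_specs.foldl (fun acc line_spec => line_spec.foldl (fun acc2 coord => acc2 ++ [coord]) acc) acc
        = acc ++ line_specs.flatten := by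
    intro acc
    calc line_specs.foldl (fun acc line_spec => line_spec.foldl (fun acc2 coord => acc2 ++ [coord]) acc) acc
        = line_specs.foldl (fun acc line_spec => acc ++ line_spec) acc :=
          PySem.List.foldl_congr_mem _ _ _ _
            (fun a x _ => PySem.List.foldl_append_singleton_eq_self x a)
      _ = acc ++ line_specs.flatten := PySem.List.foldl_append_eq_flatten line_specs acc
  have hcoords :
      lpoint_specs.foldl (fun acc lpoint_spec => acc ++ [lpoint_spec.1])
        (line_specs.foldl (fun acc line_spec => line_spec.foldl (fun acc2 coord => acc2 ++ [coord]) acc) [])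
      = line_specs.flatMap (fun line_spec => line_spec) ++ lpoint_specs.map (fun lpoint_spec => lpoint_spec.1) := by
    rw [hinner, PySem.List.foldl_append_singleton_eq_map]
    simp [List.flatMap_def]
  -- A's uniqueness loop is Python's ordered dedup
  have hdedup : ∀ (coords : List (Int × Int × Int)),
      coords.foldl (fun u coord => if coord ∈ u then u else u ++ [coord]) []
        = PySem.List.dedup coords := by
    intro coords
    rw [PySem.List.dedup_eq_ofList, PySem.Set.ofList_eq_foldl]
    refine PySem.List.foldl_congr_mem _ _ _ _ ?_
    intro u c _
    by_cases hc : c ∈ u <;> simp [PySem.Set.add, PySem.Set.contains, hc]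
  rw [hcoords, hdedup, pvCollapse_eq_sorted_dedup, pvCollapse_foldl]
  rfl
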